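-- pv_equiv track=rewrite | github.com/spesmilo/electrum | lib/cashacct.py | _calc_minimal_chashes_for_sorted_lcased_tups
-- ===== SOURCE A (Python) =====
-- from collections import defaultdict, namedtuple
-- from typing import List, Tuple, Dict
--
-- collision_hash_length = 10  # DO NOT MODIFY -- this is hard-coded in spec
--
-- def _calc_minimal_chashes_for_sorted_lcased_tups(tups : List[Tuple[str,str]]) -> Dict[str, Dict[str, str]]:
--     '''' Given a list of sorted tuples, with names already all lowercased,
--     returns a dict of:
--
--     lc_ name -> dict of collision_hash -> minimal_collision_hash '''
--     ret = defaultdict(dict)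
--
--     N = collision_hash_length
--     idxs = [0] * len(tups)
--     for i in range(len(tups)-1):
--
--         pnam, pch = tups[i]
--         nam, ch = tups[i+1]
--
--         j = 0
--         if pnam == nam:
--             while j < N and ch[:j] == pch[:j]:
--                 j += 1
--         idxs[i] = max(idxs[i], j)
--         idxs[i+1] = max(idxs[i+1], j)
--
--     for n, tupe in enumerate(tups):
--         nam, ch = tupe
--         ret[nam][ch] = ch[:idxs[n]]
--
--     return ret
-- ===== SOURCE B (Python) =====
-- from collections import defaultdict
-- from typing import List, Tuple, Dict
--
-- collision_hash_length = 10  # DO NOT MODIFY -- this is hard-coded in spec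
--
-- def _calc_minimal_chashes_for_sorted_lcased_tups(tups : List[Tuple[str,str]]) -> Dict[str, Dict[str, str]]:
--     ''' Per-element formulation: each tuple's minimal prefix length is the larger
--     of the lengths needed to distinguish its hash from each same-named neighbour,
--     computed from a closed-form common-prefix length (no shared idxs array). '''
--     N = collision_hash_length
--
--     def dist(a, b):
--         # minimal prefix length distinguishing the two hashes, 0 if not comparable
--         if a is None or b is None or a[0] != b[0]:
--             return 0
--         if a[1] == b[1]:
--             return N
--         ha, hb = a[1], b[1]
--         k = 0
--         m = min(len(ha), len(hb))
--         while k < m and ha[k] == hb[k]: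
--             k += 1
--         return min(N, k + 1)
--
--     ret = defaultdict(dict)
--     for n, (nam, ch) in enumerate(tups):
--         prev = tups[n-1] if n > 0 else None
--         nxt = tups[n+1] if n + 1 < len(tups) else None
--         ret[nam][ch] = ch[:max(dist(prev, tups[n]), dist(tups[n], nxt))]
--     return ret
-- ===== Notes on version B (the rewrite author's own statement) =====
-- stated objective: alternative
-- what changed: Replaces the shared mutable idxs array updated across a pairwise pass with a direct per-element computation: each tuple's prefix length is the max of closed-form distinguishing-prefix lengths against its two neighbours, computed from a common-prefix length instead of repeated slice comparisons.
import Mathlib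
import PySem

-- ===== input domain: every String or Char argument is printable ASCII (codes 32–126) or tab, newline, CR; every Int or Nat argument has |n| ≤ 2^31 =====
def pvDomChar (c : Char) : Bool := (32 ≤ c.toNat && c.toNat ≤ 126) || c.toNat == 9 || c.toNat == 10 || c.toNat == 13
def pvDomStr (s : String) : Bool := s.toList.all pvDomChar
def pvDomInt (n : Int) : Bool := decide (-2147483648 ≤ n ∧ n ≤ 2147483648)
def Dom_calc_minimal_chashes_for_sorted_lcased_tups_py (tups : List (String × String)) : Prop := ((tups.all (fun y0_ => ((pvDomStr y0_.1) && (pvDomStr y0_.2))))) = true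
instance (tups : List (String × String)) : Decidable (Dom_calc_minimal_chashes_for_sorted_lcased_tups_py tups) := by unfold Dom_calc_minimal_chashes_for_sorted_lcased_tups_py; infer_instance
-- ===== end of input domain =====

-- B replaces A's shared mutable idxs array (filled by a pass over adjacent pairs) with a
-- direct per-element computation from each tuple's two neighbours using a closed-form
-- common-prefix length; same results, similar cost (objective: alternative).

-- ===== PORT A =====
-- 'j = 0; while j < N and ch[:j] == pch[:j]: j += 1'  (N = 10; nonneg slice bound = take, exact)
def pvAWhile (pch ch : List Char) (j : Nat) : Nat :=
  if j < 10 ∧ ch.take j = pch.take j then pvAWhile pch ch (j + 1) else j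
termination_by 10 - j

-- one iteration of 'for i in range(len(tups)-1)': reads tups[i], tups[i+1], updates idxs[i], idxs[i+1]
def pvAStep (tups : List (String × String)) (idxs : List Nat) (i : Int) : List Nat :=
  let p := PySem.List.pyGetD tups i ("", "")
  let c := PySem.List.pyGetD tups (i + 1) ("", "")
  let j := if p.1 = c.1 then pvAWhile p.2.toList c.2.toList 0 else 0
  let idxs1 := PySem.List.pySetD idxs i (max (PySem.List.pyGetD idxs i 0) j)
  PySem.List.pySetD idxs1 (i + 1) (max (PySem.List.pyGetD idxs1 (i + 1) 0) j)

def calc_minimal_chashes_for_sorted_lcased_tups_py (tups : List (String × String)) : List (String × List (String × String)) :=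
  let idxs := (PySem.List.pyRange 0 ((tups.length : Int) - 1) 1).foldl (pvAStep tups) (List.replicate tups.length 0)
  -- for n, (nam, ch) in enumerate(tups): ret[nam][ch] = ch[:idxs[n]]   (ret = defaultdict(dict))
  let ret := (PySem.List.enumerate tups).foldl
    (fun (ret : PySem.Dict String (PySem.Dict String String)) nt =>
      ret.modify nt.2.1 PySem.Dict.empty
        (fun inner => inner.insert nt.2.2 (String.ofList (nt.2.2.toList.take (PySem.List.pyGetD idxs nt.1 0)))))
    PySem.Dict.empty
  ret.items.map (fun q => (q.1, q.2.items))

-- ===== PORT B =====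
-- 'k = 0; while k < m and ha[k] == hb[k]: k += 1'  — transliterated structurally
def pvLcp : List Char → List Char → Nat
  | a :: as, b :: bs => if a = b then pvLcp as bs + 1 else 0
  | _, _ => 0

-- Source B's dist(a, b): 0 if either is None or names differ; N if hashes equal; else min(N, lcp+1)
def pvDist (a b : Option (String × String)) : Nat :=
  match a, b with
  | some a, some b =>
      if a.1 ≠ b.1 then 0
      else if a.2 = b.2 then 10
      else min 10 (pvLcp a.2.toList b.2.toList + 1)
  | _, _ => 0

def calc_minimal_chashes_for_sorted_lcased_tups_py_alt (tups : List (String × String)) : List (String × List (String × String)) :=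
  let ret := (PySem.List.enumerate tups).foldl
    (fun (ret : PySem.Dict String (PySem.Dict String String)) nt =>
      let n := nt.1
      let cur := nt.2
      let prev := if 0 < n then PySem.List.pyGet? tups (n - 1) else none
      let nxt := if n + 1 < (tups.length : Int) then PySem.List.pyGet? tups (n + 1) else none
      ret.modify cur.1 PySem.Dict.empty
        (fun inner => inner.insert cur.2
          (String.ofList (cur.2.toList.take (max (pvDist prev (some cur)) (pvDist (some cur) nxt))))))
    PySem.Dict.empty
  ret.items.map (fun q => (q.1, q.2.items))

-- ===== PRECONDITION & SPEC =====
def Spec_calc_minimal_chashes_for_sorted_lcased_tups_py (tups : List (String × String)) (out : List (String × List (String × String))) : Prop := out = calc_minimal_chashes_for_sorted_lcased_tups_py_alt tups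
instance (tups : List (String × String)) (out : List (String × List (String × String))) : Decidable (Spec_calc_minimal_chashes_for_sorted_lcased_tups_py tups out) := by unfold Spec_calc_minimal_chashes_for_sorted_lcased_tups_py; infer_instance

-- ===== CLAIM (what is proved, stated in full; the proofs are below) =====
def Claim_equal_calc_minimal_chashes_for_sorted_lcased_tups_py : Prop := ∀ (tups : List (String × String)), Dom_calc_minimal_chashes_for_sorted_lcased_tups_py tups → Spec_calc_minimal_chashes_for_sorted_lcased_tups_py tups (calc_minimal_chashes_for_sorted_lcased_tups_py tups)

-- ===== LEMMAS AND PROOFS =====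

-- value A assigns to the adjacent pair (k, k+1); 0 when k+1 is out of range
def pvJv (tups : List (String × String)) (k : Nat) : Nat := pvDist tups[k]? tups[k + 1]?

theorem pvLcp_comm (a b : List Char) : pvLcp a b = pvLcp b a := by
  induction a generalizing b with
  | nil => cases b <;> simp [pvLcp]
  | cons x xs ih =>
    cases b with
    | nil => simp [pvLcp]
    | cons y ys =>
      by_cases h : x = y
      · subst h; simp [pvLcp, ih]
      · simp only [pvLcp, if_neg h, if_neg (fun hh => h (Eq.symm hh))]

theorem take_eq_of_le_lcp (a b : List Char) (j : Nat) (h : j ≤ pvLcp a b) :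
    a.take j = b.take j := by
  induction a generalizing b j with
  | nil => cases b <;> simp [pvLcp] at h <;> simp [h]
  | cons x xs ih =>
    cases b with
    | nil => simp [pvLcp] at h; simp [h]
    | cons y ys =>
      cases j with
      | zero => simp
      | succ j =>
        by_cases hxy : x = y
        · subst hxy
          simp only [pvLcp, if_pos rfl] at h
          simp [List.take_succ_cons, ih ys j (Nat.le_of_succ_le_succ h)]
        · simp [pvLcp, hxy] at h

theorem take_lcp_succ_ne (a b : List Char) (hne : a ≠ b) :
    a.take (pvLcp a b + 1) ≠ b.take (pvLcp a b + 1) := by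
  induction a generalizing b with
  | nil =>
    cases b with
    | nil => exact absurd rfl hne
    | cons y ys => simp [pvLcp]
  | cons x xs ih =>
    cases b with
    | nil => simp [pvLcp]
    | cons y ys =>
      by_cases hxy : x = y
      · subst hxy
        have hne' : xs ≠ ys := fun h => hne (by rw [h])
        simp only [pvLcp, if_pos rfl, List.take_succ_cons]
        intro h
        exact ih ys hne' (by injection h)
      · simp [pvLcp, hxy]

theorem pvAWhile_eq (pch ch : List Char) (T : Nat) (hT : T ≤ 10)
    (hcond : ∀ j, j < T → ch.take j = pch.take j)
    (hstop : T = 10 ∨ ch.take T ≠ pch.take T) :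
    ∀ j, j ≤ T → pvAWhile pch ch j = T := by
  intro j hj
  rw [pvAWhile]
  by_cases hjT : j = T
  · subst hjT
    rcases hstop with h10 | hne
    · subst h10; simp
    · rw [if_neg (by tauto)]
  · have hlt : j < T := lt_of_le_of_ne hj hjT
    rw [if_pos ⟨lt_of_lt_of_le hlt hT, hcond j hlt⟩]
    exact pvAWhile_eq pch ch T hT hcond hstop (j + 1) hlt
termination_by j _ => T - j

theorem pvAWhile_char (pch ch : List Char) :
    pvAWhile pch ch 0 = if ch = pch then 10 else min 10 (pvLcp ch pch + 1) := by
  by_cases h : ch = pch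
  · subst h
    rw [if_pos rfl]
    exact pvAWhile_eq ch ch 10 le_rfl (fun _ _ => rfl) (Or.inl rfl) 0 (Nat.zero_le _)
  · rw [if_neg h]
    refine pvAWhile_eq pch ch _ (Nat.min_le_left _ _) ?_ ?_ 0 (Nat.zero_le _)
    · intro j hj
      exact take_eq_of_le_lcp ch pch j (by omega)
    · by_cases hc : pvLcp ch pch + 1 ≤ 10
      · right
        rw [Nat.min_eq_right hc]
        exact take_lcp_succ_ne ch pch h
      · left; omega

-- getD through List.set
theorem getD_set (l : List Nat) (i n : Nat) (v : Nat) :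
    (l.set i v).getD n 0 = if i = n ∧ i < l.length then v else l.getD n 0 := by
  simp only [List.getD, List.getElem?_set]
  split_ifs with h1 h2 h3 h3 <;> simp_all <;> omega

theorem pvLoop_length (tups : List (String × String)) (l : List Int) (idxs : List Nat) :
    (l.foldl (pvAStep tups) idxs).length = idxs.length := by
  induction l generalizing idxs with
  | nil => rfl
  | cons i rest ih => rw [List.foldl_cons, ih]; simp [pvAStep]

theorem pvDist_none_right (a : Option (String × String)) : pvDist a none = 0 := by
  cases a <;> rfl

theorem pvJv_zero (tups : List (String × String)) (k : Nat) (h : tups.length ≤ k + 1) :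
    pvJv tups k = 0 := by
  rw [pvJv, List.getElem?_eq_none h, pvDist_none_right]

theorem pvStr_eq_iff (p q : String) : p = q ↔ p.toList = q.toList := by
  constructor
  · intro h; rw [h]
  · intro h
    have := congrArg String.ofList h
    simpa using this

theorem pvJ_eq (tups : List (String × String)) (m : Nat) (h : m + 1 < tups.length) :
    (if (tups.getD m ("", "")).1 = (tups.getD (m + 1) ("", "")).1
      then pvAWhile (tups.getD m ("", "")).2.toList (tups.getD (m + 1) ("", "")).2.toList 0 else 0)
      = pvJv tups m := by
  have hm : m < tups.length := by omega
  rw [List.getD_eq_getElem tups _ hm, List.getD_eq_getElem tups _ h]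
  rw [pvJv, List.getElem?_eq_getElem hm, List.getElem?_eq_getElem h]
  rw [pvAWhile_char]
  by_cases hn : tups[m].1 = tups[m + 1].1
  · rw [if_pos hn]
    by_cases hh : tups[m].2 = tups[m + 1].2
    · rw [if_pos (by rw [← pvStr_eq_iff]; exact hh.symm)]
      simp [pvDist, hn, hh]
    · rw [if_neg (by rw [← pvStr_eq_iff]; exact fun hx => hh hx.symm)]
      simp [pvDist, hn, hh, pvLcp_comm]
  · rw [if_neg hn]
    simp [pvDist, hn]

theorem pvLoop_inv (tups : List (String × String)) (m : Nat) (hm : m + 1 ≤ tups.length) :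
    ∀ n : Nat,
    ((PySem.List.pyRange 0 (m : Int) 1).foldl (pvAStep tups) (List.replicate tups.length 0)).getD n 0
      = max (if 1 ≤ n ∧ n ≤ m then pvJv tups (n - 1) else 0) (if n < m then pvJv tups n else 0) := by
  induction m with
  | zero =>
    intro n
    rw [PySem.List.pyRange_one_eq_nil (by omega)]
    simp only [List.foldl_nil]
    have hrep : (List.replicate tups.length 0).getD n 0 = 0 := by
      simp [List.getD]
    rw [hrep, if_neg (show ¬ (1 ≤ n ∧ n ≤ 0) by omega), if_neg (show ¬ n < 0 by omega)]
    simp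
  | succ m ih =>
    intro n
    have hm' : m + 1 ≤ tups.length := by omega
    have hrange : PySem.List.pyRange 0 ((m : Int) + 1) 1
        = PySem.List.pyRange 0 (m : Int) 1 ++ [(m : Int)] := by
      exact PySem.List.pyRange_one_succ_right (by omega)
    have hcast : ((m + 1 : Nat) : Int) = (m : Int) + 1 := by push_cast; ring
    rw [hcast, hrange, List.foldl_append, List.foldl_cons, List.foldl_nil]
    set idxs := (PySem.List.pyRange 0 (m : Int) 1).foldl (pvAStep tups) (List.replicate tups.length 0) with hidxs
    have hlen : idxs.length = tups.length := by
      rw [hidxs, pvLoop_length, List.length_replicate]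
    have hmlt : m < tups.length := by omega
    have hm1lt : m + 1 < tups.length := by omega
    rw [pvAStep]
    simp only [PySem.List.pyGetD_natCast, PySem.List.pySetD_natCast, hcast.symm]
    rw [pvJ_eq tups m hm1lt]
    rw [getD_set, getD_set, getD_set]
    rw [List.length_set, hlen]
    have hIn := ih hm' n
    have hIm := ih hm' m
    have hIm1 := ih hm' (m + 1)
    rw [if_neg (show ¬ (1 ≤ m + 1 ∧ m + 1 ≤ m) by omega), if_neg (show ¬ m + 1 < m by omega)] at hIm1
    rw [if_neg (show ¬ m < m by omega)] at hIm
    by_cases hn1 : n = m + 1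
    · subst hn1
      rw [if_pos ⟨rfl, hm1lt⟩, hIm1]
      rw [if_pos (show 1 ≤ m + 1 ∧ m + 1 ≤ m + 1 by omega), if_neg (show ¬ m + 1 < m + 1 by omega)]
      simp
    · rw [if_neg (by intro hc; exact hn1 hc.1.symm)]
      by_cases hn0 : n = m
      · subst hn0
        rw [if_pos ⟨rfl, hmlt⟩, hIm]
        by_cases h1m : 1 ≤ n
        · rw [if_pos ⟨h1m, le_rfl⟩, if_pos ⟨h1m, by omega⟩, if_pos (show n < n + 1 by omega)]
          omega
        · rw [if_neg (by omega), if_neg (by omega), if_pos (show n < n + 1 by omega)]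
          omega
      · rw [if_neg (by intro hc; exact hn0 hc.1.symm), hIn]
        rw [show (if 1 ≤ n ∧ n ≤ m + 1 then pvJv tups (n - 1) else 0)
              = (if 1 ≤ n ∧ n ≤ m then pvJv tups (n - 1) else 0) by
            rcases Nat.lt_trichotomy n (m + 1) with h | h | h
            · congr 1; simp only [eq_iff_iff]; omega
            · exact absurd h hn1
            · rw [if_neg (by omega), if_neg (by omega)]]
        rw [show (if n < m + 1 then pvJv tups n else 0)
              = (if n < m then pvJv tups n else 0) by
            congr 1; simp only [eq_iff_iff]; omega]

theorem pvIdxs_eq (tups : List (String × String)) (k : Nat) (hk : k < tups.length) :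
    ((PySem.List.pyRange 0 ((tups.length : Int) - 1) 1).foldl (pvAStep tups) (List.replicate tups.length 0)).getD k 0
      = max (if 1 ≤ k then pvJv tups (k - 1) else 0) (pvJv tups k) := by
  have hlen1 : 1 ≤ tups.length := by omega
  have hcast : ((tups.length : Int) - 1) = ((tups.length - 1 : Nat) : Int) := by
    omega
  rw [hcast, pvLoop_inv tups (tups.length - 1) (by omega) k]
  congr 1
  · congr 1; simp only [eq_iff_iff]; omega
  · by_cases h : k < tups.length - 1
    · rw [if_pos h]
    · rw [if_neg h, pvJv_zero tups k (by omega)]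

theorem pvB_val (tups : List (String × String)) (k : Nat) (hk : k < tups.length) :
    max (pvDist (if 0 < (k : Int) then PySem.List.pyGet? tups ((k : Int) - 1) else none) (some tups[k]))
        (pvDist (some tups[k]) (if (k : Int) + 1 < (tups.length : Int) then PySem.List.pyGet? tups ((k : Int) + 1) else none))
      = max (if 1 ≤ k then pvJv tups (k - 1) else 0) (pvJv tups k) := by
  congr 1
  · by_cases h1 : 1 ≤ k
    · rw [if_pos (show (0 : Int) < (k : Int) by omega)]
      rw [show ((k : Int) - 1) = ((k - 1 : Nat) : Int) by omega, PySem.List.pyGet?_natCast]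
      rw [if_pos h1, pvJv, show k - 1 + 1 = k by omega, List.getElem?_eq_getElem hk]
    · rw [if_neg (show ¬ (0 : Int) < (k : Int) by omega), if_neg h1]
      rfl
  · by_cases h2 : k + 1 < tups.length
    · rw [if_pos (show (k : Int) + 1 < (tups.length : Int) by omega)]
      rw [show ((k : Int) + 1) = ((k + 1 : Nat) : Int) by push_cast; ring, PySem.List.pyGet?_natCast]
      rw [pvJv, List.getElem?_eq_getElem hk]
    · rw [if_neg (show ¬ (k : Int) + 1 < (tups.length : Int) by omega)]
      rw [pvJv_zero tups k (by omega), pvDist_none_right]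

-- ===== VERDICT (by name: the statement is the Claim_ definition above) =====
theorem calc_minimal_chashes_for_sorted_lcased_tups_py_spec : Claim_equal_calc_minimal_chashes_for_sorted_lcased_tups_py := by
  intro tups _
  unfold Spec_calc_minimal_chashes_for_sorted_lcased_tups_py
  unfold calc_minimal_chashes_for_sorted_lcased_tups_py calc_minimal_chashes_for_sorted_lcased_tups_py_alt
  simp only []
  congr 1
  congr 1
  apply PySem.List.foldl_congr_mem
  intro acc x hx
  rw [PySem.List.mem_enumerate_iff] at hx
  obtain ⟨k, hk, rfl⟩ := hx
  simp only [zero_add, PySem.List.pyGetD_natCast]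
  rw [pvIdxs_eq tups k hk, ← pvB_val tups k hk]
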